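-- pv_equiv track=rewrite | github.com/Surjeeth-03/Flames.game | templates/flames.py | calculate_flames
-- ===== SOURCE A (Python) =====
-- def calculate_flames(name1, name2):
--     a = list(name1.lower().replace(" ", ""))
--     b = list(name2.lower().replace(" ", ""))
--
--     for ch in a[:]:
--         if ch in b:
--             a.remove(ch)
--             b.remove(ch)
--
--     count = len(a) + len(b)
--
--     flames = ["F", "L", "A", "M", "E", "S"]
--     index = 0
--
--     while len(flames) > 1:
--         index = (index + count - 1) % len(flames)
--         flames.pop(index)
--
--     meanings = {
--         "F": "Friend",
--         "L": "Love",
--         "A": "Affection",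
--         "M": "Marriage",
--         "E": "Enemy",
--         "S": "Sister"
--     }
--
--     return meanings[flames[0]]
-- ===== SOURCE B (Python) =====
-- def calculate_flames(name1, name2):
--     a = list(name1.lower().replace(" ", ""))
--     b = list(name2.lower().replace(" ", ""))
--     count = sum(abs(a.count(c) - b.count(c)) for c in set(a + b))
--     pos = 0
--     for n in range(2, 7):
--         pos = (pos + count) % n
--     return ["Friend", "Love", "Affection", "Marriage", "Enemy", "Sister"][pos]
-- ===== Notes on version B (the rewrite author's own statement) =====
-- stated objective: faster
-- what changed: Replaces the destructive remove-first-occurrence cancellation loop by a per-distinct-character count difference (count = sum of |count_a(c)-count_b(c)| over set(a+b)) and the list-pop FLAMES elimination by a Josephus-style index recurrence over sizes 2..6.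
import Mathlib
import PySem

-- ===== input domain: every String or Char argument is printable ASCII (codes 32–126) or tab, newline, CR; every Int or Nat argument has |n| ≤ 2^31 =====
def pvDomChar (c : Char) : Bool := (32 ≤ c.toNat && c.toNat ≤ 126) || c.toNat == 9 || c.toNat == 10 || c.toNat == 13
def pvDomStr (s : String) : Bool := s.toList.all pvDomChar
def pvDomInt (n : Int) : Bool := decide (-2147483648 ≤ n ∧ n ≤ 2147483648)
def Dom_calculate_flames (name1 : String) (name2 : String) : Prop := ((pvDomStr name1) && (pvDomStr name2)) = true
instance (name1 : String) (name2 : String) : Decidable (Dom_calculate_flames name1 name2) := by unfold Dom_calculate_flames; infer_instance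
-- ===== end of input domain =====

-- B replaces A's quadratic remove-one-occurrence cancellation by per-distinct-character
-- count differences and the list-pop elimination by a Josephus-style index recurrence (faster).


-- ===== PORT A =====
-- 'for ch in a[:]: if ch in b: a.remove(ch); b.remove(ch)' — fold over the copy of a;
-- remove? is always `some` here (the guard gives ch ∈ b, and ch ∈ a holds invariantly), so .getD is an unreachable fallback
def pvCancelA : List Char → List Char × List Char → List Char × List Char
  | [], s => s
  | ch :: rest, (a, b) =>
      if ch ∈ b then
        pvCancelA rest ((PySem.List.remove? a ch).getD a, (PySem.List.remove? b ch).getD b)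
      else pvCancelA rest (a, b)

-- 'while len(flames) > 1: index = (index + count - 1) % len(flames); flames.pop(index)'
-- fuel bounds the loop (each iteration pops one element; fuel = initial length suffices);
-- pop? is always `some` here (the index is a `mod` by the positive length), `none` is an unreachable fallback
def pvElimA : Nat → List String → Int → Int → List String
  | 0, flames, _, _ => flames
  | fuel + 1, flames, index, count =>
      if flames.length > 1 then
        match PySem.List.pop? flames (PySem.Int.mod (index + count - 1) (flames.length : Int)) with
        | some (_, rest) => pvElimA fuel rest (PySem.Int.mod (index + count - 1) (flames.length : Int)) count
        | none => flames
      else flames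

def calculate_flames (name1 : String) (name2 : String) : String :=
  let a : List Char := (PySem.Str.replace (PySem.Str.lower name1) " " "").toList
  let b : List Char := (PySem.Str.replace (PySem.Str.lower name2) " " "").toList
  let ab := pvCancelA a (a, b)
  let count : Int := (ab.1.length : Int) + (ab.2.length : Int)
  let flames := pvElimA 6 ["F", "L", "A", "M", "E", "S"] 0 count
  let meanings : PySem.Dict String String :=
    PySem.Dict.ofList [("F", "Friend"), ("L", "Love"), ("A", "Affection"),
                       ("M", "Marriage"), ("E", "Enemy"), ("S", "Sister")]
  -- meanings[flames[0]] — the loop leaves one element and it is a key, so both fallbacks are unreachable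
  meanings.getD ((PySem.List.pyGet? flames 0).getD "F") ""

-- ===== PORT B =====
def calculate_flames_alt (name1 : String) (name2 : String) : String :=
  let a : List Char := (PySem.Str.replace (PySem.Str.lower name1) " " "").toList
  let b : List Char := (PySem.Str.replace (PySem.Str.lower name2) " " "").toList
  -- sum(abs(a.count(c) - b.count(c)) for c in set(a + b)) — an Int sum over a set, order-independent
  let count : Int := ((PySem.Set.ofList (a ++ b)).map
      (fun c => |(a.count c : Int) - (b.count c : Int)|)).sum
  -- for n in range(2, 7): pos = (pos + count) % n
  let pos : Int := (PySem.List.pyRange 2 7 1).foldl (fun pos n => PySem.Int.mod (pos + count) n) 0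
  PySem.List.pyGetD ["Friend", "Love", "Affection", "Marriage", "Enemy", "Sister"] pos ""

-- ===== PRECONDITION & SPEC =====
def Spec_calculate_flames (name1 : String) (name2 : String) (out : String) : Prop := out = calculate_flames_alt name1 name2
instance (name1 : String) (name2 : String) (out : String) : Decidable (Spec_calculate_flames name1 name2 out) := by unfold Spec_calculate_flames; infer_instance

-- ===== CLAIM (what is proved, stated in full; the proofs are below) =====
def Claim_equal_calculate_flames : Prop := ∀ (name1 : String) (name2 : String), Dom_calculate_flames name1 name2 → Spec_calculate_flames name1 name2 (calculate_flames name1 name2)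

-- ===== LEMMAS AND PROOFS =====

-- remove? takes the FIRST occurrence: with ch not in the prefix it pops the head of the suffix
theorem pvRemove_append_cons (l t : List Char) (ch : Char) (h : ch ∉ l) :
    PySem.List.remove? (l ++ ch :: t) ch = some (l ++ t) := by
  induction l with
  | nil => simp [PySem.List.remove?_cons_self]
  | cons x l ih =>
      have hx : x ≠ ch := fun he => h (by simp [he])
      have h' : ch ∉ l := fun hm => h (by simp [hm])
      simp only [List.cons_append]
      rw [PySem.List.remove?_cons_of_ne _ hx, ih h']; rfl

-- length invariant of A's cancellation loop: the processed-and-kept prefix l never meets b again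
theorem pvCancelA_len (rest : List Char) : ∀ (l b : List Char), (∀ c ∈ l, c ∉ b) →
    (pvCancelA rest (l ++ rest, b)).1.length + (pvCancelA rest (l ++ rest, b)).2.length
      + 2 * Multiset.card ((rest : Multiset Char) ∩ (b : Multiset Char))
    = l.length + rest.length + b.length := by
  induction rest with
  | nil => intro l b _; simp [pvCancelA]
  | cons ch t ih =>
      intro l b hinv
      by_cases hch : ch ∈ b
      · have hnl : ch ∉ l := fun hl => (hinv ch hl) hch
        have h1 : PySem.List.remove? (l ++ ch :: t) ch = some (l ++ t) :=
          pvRemove_append_cons l t ch hnl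
        have h2 : PySem.List.remove? b ch = some (b.erase ch) :=
          PySem.List.remove?_eq_some_erase b ch hch
        have hinv' : ∀ c ∈ l, c ∉ b.erase ch := fun c hc hce => hinv c hc (List.mem_of_mem_erase hce)
        have ihx := ih l (b.erase ch) hinv'
        have hcard : Multiset.card ((↑(ch :: t) : Multiset Char) ∩ ↑b)
            = Multiset.card ((↑t : Multiset Char) ∩ ↑(b.erase ch)) + 1 := by
          rw [show ((↑(ch :: t) : Multiset Char)) = ch ::ₘ (↑t : Multiset Char) from rfl,
              Multiset.cons_inter_of_pos _ (by simpa using hch), ← Multiset.coe_erase]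
          simp
        have hlen : (b.erase ch).length + 1 = b.length := by
          rw [List.length_erase_of_mem hch]
          have : b.length ≠ 0 := by
            intro h0; rw [List.length_eq_zero_iff] at h0; subst h0; simp at hch
          omega
        have step : pvCancelA (ch :: t) (l ++ ch :: t, b) = pvCancelA t (l ++ t, b.erase ch) := by
          simp [pvCancelA, if_pos hch, h1, h2]
        rw [step, hcard]
        simp only [List.length_cons]
        omega
      · have hinv' : ∀ c ∈ l ++ [ch], c ∉ b := by
          intro c hc
          rcases List.mem_append.mp hc with h | h
          · exact hinv c h
          · simp at h; subst h; exact hch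
        have ihx := ih (l ++ [ch]) b hinv'
        have harg : (l ++ [ch]) ++ t = l ++ ch :: t := by simp
        rw [harg] at ihx
        simp only [List.length_append, List.length_cons, List.length_nil] at ihx
        have hcard : ((↑(ch :: t) : Multiset Char) ∩ ↑b) = ((↑t : Multiset Char) ∩ ↑b) := by
          rw [show ((↑(ch :: t) : Multiset Char)) = ch ::ₘ (↑t : Multiset Char) from rfl,
              Multiset.cons_inter_of_neg _ (by simpa using hch)]
        have step : pvCancelA (ch :: t) (l ++ ch :: t, b) = pvCancelA t (l ++ ch :: t, b) := by
          simp [pvCancelA, if_neg hch]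
        rw [step, hcard]
        simp only [List.length_cons]
        omega

-- a sum of multiset counts over any finset containing the support is the card
theorem pvSumCount (m : Multiset Char) (S : Finset Char) (h : m.toFinset ⊆ S) :
    ∑ c ∈ S, m.count c = Multiset.card m := by
  rw [← Multiset.toFinset_sum_count_eq]
  exact (Finset.sum_subset h (fun x _ hx => by
    rw [Multiset.count_eq_zero]
    exact fun hm => hx (Multiset.mem_toFinset.mpr hm))).symm

-- B's sum of |count differences| equals len a + len b - 2·|a ∩ b| (as multisets)
theorem pvSumAbs (a b : List Char) :
    ((PySem.Set.ofList (a ++ b)).map (fun c => |(a.count c : Int) - (b.count c : Int)|)).sum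
      = (a.length : Int) + (b.length : Int)
        - 2 * (Multiset.card ((↑a : Multiset Char) ∩ ↑b) : Int) := by
  have hnd : (PySem.Set.ofList (a ++ b)).Nodup := PySem.Set.nodup_ofList (a ++ b)
  rw [← List.sum_toFinset _ hnd]
  have hS : (PySem.Set.ofList (a ++ b)).toFinset = (a ++ b).toFinset := by
    ext x; simp [List.mem_toFinset, PySem.Set.mem_ofList]
  rw [hS]
  have habs : ∀ c ∈ (a ++ b).toFinset,
      |(a.count c : Int) - (b.count c : Int)|
        = ((a.count c : Int) + (b.count c : Int)) - 2 * ((↑a ∩ ↑b : Multiset Char).count c : Int) := by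
    intro c _
    have hc : (↑a ∩ ↑b : Multiset Char).count c = min (a.count c) (b.count c) := by
      rw [Multiset.count_inter]; simp
    rw [hc]
    rcases abs_cases ((a.count c : Int) - (b.count c : Int)) with ⟨h1, h2⟩ | ⟨h1, h2⟩ <;> omega
  rw [Finset.sum_congr rfl habs, Finset.sum_sub_distrib, Finset.sum_add_distrib, ← Finset.mul_sum]
  have hsub1 : (↑a : Multiset Char).toFinset ⊆ (a ++ b).toFinset := by
    intro x hx; simp at hx ⊢; exact Or.inl hx
  have hsub2 : (↑b : Multiset Char).toFinset ⊆ (a ++ b).toFinset := by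
    intro x hx; simp at hx ⊢; exact Or.inr hx
  have hsub3 : ((↑a ∩ ↑b : Multiset Char)).toFinset ⊆ (a ++ b).toFinset := by
    intro x hx
    simp only [Multiset.mem_toFinset, Multiset.mem_inter] at hx
    simp only [List.mem_toFinset, List.mem_append]
    exact Or.inl (by simpa using hx.1)
  have e1 : ∑ c ∈ (a ++ b).toFinset, (a.count c : Int) = (a.length : Int) := by
    rw [← Nat.cast_sum]
    have := pvSumCount (↑a) (a ++ b).toFinset hsub1
    simp only [Multiset.coe_count, Multiset.coe_card] at this
    rw [this]
  have e2 : ∑ c ∈ (a ++ b).toFinset, (b.count c : Int) = (b.length : Int) := by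
    rw [← Nat.cast_sum]
    have := pvSumCount (↑b) (a ++ b).toFinset hsub2
    simp only [Multiset.coe_count, Multiset.coe_card] at this
    rw [this]
  have e3 : ∑ c ∈ (a ++ b).toFinset, ((↑a ∩ ↑b : Multiset Char).count c : Int)
      = (Multiset.card ((↑a : Multiset Char) ∩ ↑b) : Int) := by
    rw [← Nat.cast_sum, pvSumCount _ _ hsub3]
  rw [e1, e2, e3]

-- A's elimination depends on count only through its residues mod 2..len(flames)
theorem pvElimA_congr (fuel : Nat) : ∀ (flames : List String) (idx c c' : Int),
    (∀ k : Nat, 2 ≤ k → k ≤ flames.length → c % (k : Int) = c' % (k : Int)) →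
    pvElimA fuel flames idx c = pvElimA fuel flames idx c' := by
  induction fuel with
  | zero => intro flames idx c c' _; rfl
  | succ fuel ih =>
      intro flames idx c c' h
      by_cases h1 : flames.length > 1
      · have hpos : (0 : Int) < (flames.length : Int) := by exact_mod_cast Nat.lt_of_lt_of_le Nat.zero_lt_one h1.le
        have hmodeq : c % (flames.length : Int) = c' % (flames.length : Int) :=
          h flames.length h1 le_rfl
        have hmod : PySem.Int.mod (idx + c - 1) (flames.length : Int)
            = PySem.Int.mod (idx + c' - 1) (flames.length : Int) := by
          rw [PySem.Int.mod_eq_emod_of_pos hpos, PySem.Int.mod_eq_emod_of_pos hpos]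
          exact Int.ModEq.sub_right 1 (Int.ModEq.add_left idx hmodeq)
        simp only [pvElimA, if_pos h1, hmod]
        cases hp : PySem.List.pop? flames (PySem.Int.mod (idx + c' - 1) (flames.length : Int)) with
        | none => rfl
        | some r =>
            obtain ⟨x, rest⟩ := r
            have hlen := PySem.List.length_of_pop?_eq_some flames hp
            apply ih
            intro k hk2 hkr
            exact h k hk2 (by simp at hlen; omega)
      · simp only [pvElimA, if_neg h1]

-- both tails as a function of the residue of count mod 60: check all 60 residues
theorem pvTail_eq_of_lt (r : Int) (h0 : 0 ≤ r) (h1 : r < 60) :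
    (PySem.Dict.ofList [("F", "Friend"), ("L", "Love"), ("A", "Affection"),
        ("M", "Marriage"), ("E", "Enemy"), ("S", "Sister")]).getD
      ((PySem.List.pyGet? (pvElimA 6 ["F", "L", "A", "M", "E", "S"] 0 r) 0).getD "F") ""
    = PySem.List.pyGetD ["Friend", "Love", "Affection", "Marriage", "Enemy", "Sister"]
        ((PySem.List.pyRange 2 7 1).foldl (fun pos n => PySem.Int.mod (pos + r) n) 0) "" := by
  interval_cases r <;> decide

-- B's fold written as nested emods
theorem pvFoldB (c : Int) :
    (PySem.List.pyRange 2 7 1).foldl (fun pos n => PySem.Int.mod (pos + c) n) 0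
      = (((((0 + c) % 2 + c) % 3 + c) % 4 + c) % 5 + c) % 6 := by
  rw [show PySem.List.pyRange 2 7 1 = [2, 3, 4, 5, 6] from by decide]
  simp only [List.foldl,
    PySem.Int.mod_eq_emod_of_pos (show (0:Int) < 2 by norm_num),
    PySem.Int.mod_eq_emod_of_pos (show (0:Int) < 3 by norm_num),
    PySem.Int.mod_eq_emod_of_pos (show (0:Int) < 4 by norm_num),
    PySem.Int.mod_eq_emod_of_pos (show (0:Int) < 5 by norm_num),
    PySem.Int.mod_eq_emod_of_pos (show (0:Int) < 6 by norm_num)]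

-- the common tail: A's pop loop + dict lookup agrees with B's recurrence + list index, for any count ≥ 0
theorem pvTail_eq (c : Int) :
    (PySem.Dict.ofList [("F", "Friend"), ("L", "Love"), ("A", "Affection"),
        ("M", "Marriage"), ("E", "Enemy"), ("S", "Sister")]).getD
      ((PySem.List.pyGet? (pvElimA 6 ["F", "L", "A", "M", "E", "S"] 0 c) 0).getD "F") ""
    = PySem.List.pyGetD ["Friend", "Love", "Affection", "Marriage", "Enemy", "Sister"]
        ((PySem.List.pyRange 2 7 1).foldl (fun pos n => PySem.Int.mod (pos + c) n) 0) "" := by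
  have h0 : 0 ≤ c % 60 := Int.emod_nonneg c (by norm_num)
  have h1 : c % 60 < 60 := Int.emod_lt_of_pos c (by norm_num)
  have hA : pvElimA 6 ["F", "L", "A", "M", "E", "S"] 0 c
      = pvElimA 6 ["F", "L", "A", "M", "E", "S"] 0 (c % 60) := by
    apply pvElimA_congr
    intro k hk2 hk6
    simp only [List.length_cons, List.length_nil] at hk6
    interval_cases k <;> omega
  have hB : (PySem.List.pyRange 2 7 1).foldl (fun pos n => PySem.Int.mod (pos + c) n) 0
      = (PySem.List.pyRange 2 7 1).foldl (fun pos n => PySem.Int.mod (pos + c % 60) n) 0 := by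
    have hd : ∀ n : Int, n ∣ 60 → ∀ X : Int, (X + c) % n = (X + c % 60) % n := by
      intro n hn X
      exact Int.ModEq.add_left X ((Int.emod_emod_of_dvd c hn).symm : c % n = c % 60 % n)
    rw [pvFoldB, pvFoldB, hd 2 (by norm_num), hd 3 (by norm_num), hd 4 (by norm_num),
        hd 5 (by norm_num), hd 6 (by norm_num)]
  rw [hA, hB]
  exact pvTail_eq_of_lt (c % 60) h0 h1

-- A's count equals B's count
theorem pvCount_eq (a b : List Char) :
    ((pvCancelA a (a, b)).1.length : Int) + ((pvCancelA a (a, b)).2.length : Int)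
      = ((PySem.Set.ofList (a ++ b)).map (fun c => |(a.count c : Int) - (b.count c : Int)|)).sum := by
  have h := pvCancelA_len a [] b (by simp)
  simp only [List.nil_append, List.length_nil] at h
  rw [pvSumAbs a b]
  omega

-- ===== VERDICT (by name: the statement is the Claim_ definition above) =====
theorem calculate_flames_spec : Claim_equal_calculate_flames := by
  intro name1 name2 _
  unfold Spec_calculate_flames
  simp only [calculate_flames, calculate_flames_alt]
  generalize (PySem.Str.replace (PySem.Str.lower name1) " " "").toList = a
  generalize (PySem.Str.replace (PySem.Str.lower name2) " " "").toList = b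
  rw [← pvCount_eq a b]
  exact pvTail_eq _
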